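-- pv_equiv track=rewrite | github.com/ttrungtin2910/ai-thuc-chien-2025 | be/app/utils/document_processor.py | _build_header_context
-- ===== SOURCE A (Python) =====
-- def _build_header_context(metadata: dict) -> str:
--     """Build header context string from markdown metadata"""
--     context_parts = []
--
--     # Sort by header level
--     for i in range(1, 7):
--         header_key = f"Header {i}"
--         if header_key in metadata:
--             level_prefix = "#" * i
--             context_parts.append(f"{level_prefix} {metadata[header_key]}")
--
--     return "\n".join(context_parts) + "\n\n" if context_parts else ""
-- ===== SOURCE B (Python) =====
-- def _build_header_context(metadata: dict) -> str:
--     """Build header context string from markdown metadata"""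
--     header_levels = {f"Header {n}": n for n in range(1, 7)}
--     found = [(header_levels[key], value) for key, value in metadata.items()
--              if key in header_levels]
--     found.sort(key=lambda t: t[0])
--     lines = ["#" * n + " " + value for n, value in found]
--     return "\n".join(lines) + "\n\n" if lines else ""
-- ===== Notes on version B (the rewrite author's own statement) =====
-- stated objective: alternative
-- what changed: Instead of scanning levels 1..6 and doing a dict lookup for each, B makes a single pass over metadata.items(), filters the 'Header n' keys via a precomputed level table, sorts the hits by level, and emits the lines.
import Mathlib
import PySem

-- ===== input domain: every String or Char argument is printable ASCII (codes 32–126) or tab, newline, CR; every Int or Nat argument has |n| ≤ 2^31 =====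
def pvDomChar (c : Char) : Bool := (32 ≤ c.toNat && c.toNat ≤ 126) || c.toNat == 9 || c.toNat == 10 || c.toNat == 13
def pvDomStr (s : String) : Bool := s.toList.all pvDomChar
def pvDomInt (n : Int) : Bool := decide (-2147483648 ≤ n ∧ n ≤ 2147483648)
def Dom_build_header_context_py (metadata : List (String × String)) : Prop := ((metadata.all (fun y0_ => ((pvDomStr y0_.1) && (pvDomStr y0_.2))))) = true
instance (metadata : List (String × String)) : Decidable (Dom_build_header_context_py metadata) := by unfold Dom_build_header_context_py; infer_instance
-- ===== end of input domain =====

-- B replaces the fixed scan over levels 1..6 (six dict lookups) by a single pass over the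
-- dict's own items (filter the 'Header n' keys, sort by level); same return value everywhere.

-- ===== PORT A =====
-- The dict argument is the association list viewed through PySem.Dict.ofList (duplicate keys
-- collapse exactly as Python's dict construction does); both ports view it the same way.
def build_header_context_py (metadata : List (String × String)) : String :=
  let md : PySem.Dict String String := PySem.Dict.ofList metadata
  let context_parts : List String :=
    (PySem.List.pyRange 1 7 1).foldl
      (fun acc i =>
        let header_key := "Header " ++ PySem.Int.toStr i
        if md.contains header_key then
          -- "#" * i  (i ≥ 0 here), then f"{level_prefix} {metadata[header_key]}"
          acc ++ [String.ofList (List.replicate i.toNat '#') ++ " " ++ md.getD header_key ""]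
        else acc)
      []
  if context_parts ≠ [] then PySem.Str.join "\n" context_parts ++ "\n\n" else ""

-- ===== PORT B =====
-- header_levels = {f"Header {n}": n for n in range(1, 7)}
def header_levels_py : PySem.Dict String Int :=
  (PySem.List.pyRange 1 7 1).foldl
    (fun d n => d.insert ("Header " ++ PySem.Int.toStr n) n) PySem.Dict.empty

def build_header_context_py_alt (metadata : List (String × String)) : String :=
  let md : PySem.Dict String String := PySem.Dict.ofList metadata
  let found : List (Int × String) :=
    (md.items.filter (fun p => header_levels_py.contains p.1)).map
      (fun p => (header_levels_py.getD p.1 0, p.2))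
  let sorted_found := PySem.List.sorted found (fun t => t.1) false
  let lines := sorted_found.map
    (fun t => String.ofList (List.replicate t.1.toNat '#') ++ " " ++ t.2)
  if lines ≠ [] then PySem.Str.join "\n" lines ++ "\n\n" else ""

-- ===== PRECONDITION & SPEC =====
def Spec_build_header_context_py (metadata : List (String × String)) (out : String) : Prop := out = build_header_context_py_alt metadata
instance (metadata : List (String × String)) (out : String) : Decidable (Spec_build_header_context_py metadata out) := by unfold Spec_build_header_context_py; infer_instance

-- ===== CLAIM (what is proved, stated in full; the proofs are below) =====
def Claim_equal_build_header_context_py : Prop := ∀ (metadata : List (String × String)), Dom_build_header_context_py metadata → Spec_build_header_context_py metadata (build_header_context_py metadata)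

-- ===== LEMMAS AND PROOFS =====

-- proof-only helpers
def pvL : List Int := [1, 2, 3, 4, 5, 6]
def pvLine (t : Int × String) : String := String.ofList (List.replicate t.1.toNat '#') ++ " " ++ t.2
-- the canonical result list: for each level 1..6 in order, the entry if present
def pvT (d : PySem.Dict String String) : List (Int × String) :=
  pvL.filterMap (fun n => (d.get? ("Header " ++ PySem.Int.toStr n)).map (fun v => (n, v)))

lemma pvA_foldl (d : PySem.Dict String String) (l : List Int) (acc : List String) :
    l.foldl (fun acc i =>
        let header_key := "Header " ++ PySem.Int.toStr i
        if d.contains header_key then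
          acc ++ [String.ofList (List.replicate i.toNat '#') ++ " " ++ d.getD header_key ""]
        else acc) acc
    = acc ++ (l.filterMap (fun n => (d.get? ("Header " ++ PySem.Int.toStr n)).map
        (fun v => (n, v)))).map pvLine := by
  induction l generalizing acc with
  | nil => simp
  | cons i l ih =>
    simp only [List.foldl_cons, List.filterMap_cons]
    rcases h : d.get? ("Header " ++ PySem.Int.toStr i) with _ | v
    · have hc : d.contains ("Header " ++ PySem.Int.toStr i) = false := by
        rw [PySem.Dict.contains_eq_isSome_get?, h]; rfl
      simp [hc, ih]
    · have hc : d.contains ("Header " ++ PySem.Int.toStr i) = true := by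
        rw [PySem.Dict.contains_eq_isSome_get?, h]; rfl
      have hg : d.getD ("Header " ++ PySem.Int.toStr i) "" = v :=
        PySem.Dict.getD_of_get?_eq_some d "" h
      simp [hc, hg, ih, pvLine]

lemma pv_hl_eq : header_levels_py = PySem.Dict.mk
    [("Header 1", 1), ("Header 2", 2), ("Header 3", 3),
     ("Header 4", 4), ("Header 5", 5), ("Header 6", 6)] := by decide

lemma pv_hl_contains (k : String) :
    header_levels_py.contains k = true ↔
      ∃ n ∈ pvL, k = "Header " ++ PySem.Int.toStr n := by
  rw [pv_hl_eq]
  simp only [PySem.Dict.contains_mk, pvL]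
  constructor
  · intro h
    simp only [List.any_eq_true, List.mem_cons, List.not_mem_nil, or_false] at h
    obtain ⟨p, hp, hpk⟩ := h
    rcases hp with rfl | rfl | rfl | rfl | rfl | rfl
    · exact ⟨1, by decide, by rw [← beq_iff_eq.mp hpk]; decide⟩
    · exact ⟨2, by decide, by rw [← beq_iff_eq.mp hpk]; decide⟩
    · exact ⟨3, by decide, by rw [← beq_iff_eq.mp hpk]; decide⟩
    · exact ⟨4, by decide, by rw [← beq_iff_eq.mp hpk]; decide⟩
    · exact ⟨5, by decide, by rw [← beq_iff_eq.mp hpk]; decide⟩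
    · exact ⟨6, by decide, by rw [← beq_iff_eq.mp hpk]; decide⟩
  · rintro ⟨n, hn, rfl⟩
    simp only [List.mem_cons, List.not_mem_nil, or_false] at hn
    rcases hn with rfl | rfl | rfl | rfl | rfl | rfl <;> decide

lemma pv_hl_lvl (n : Int) (hn : n ∈ pvL) :
    header_levels_py.getD ("Header " ++ PySem.Int.toStr n) 0 = n := by
  simp only [pvL, List.mem_cons, List.not_mem_nil, or_false] at hn
  rcases hn with rfl | rfl | rfl | rfl | rfl | rfl <;> decide

-- given a contained key, its canonical form and level
lemma pv_hl_spec (k : String) (h : header_levels_py.contains k = true) :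
    k = "Header " ++ PySem.Int.toStr (header_levels_py.getD k 0) ∧
      header_levels_py.getD k 0 ∈ pvL := by
  obtain ⟨n, hn, rfl⟩ := (pv_hl_contains k).mp h
  rw [pv_hl_lvl n hn]
  exact ⟨rfl, hn⟩

lemma pvT_pairwise (d : PySem.Dict String String) :
    (pvT d).Pairwise (fun a b => a.1 < b.1) := by
  rw [pvT, List.pairwise_filterMap]
  have hL : pvL.Pairwise (· < ·) := by decide
  refine hL.imp ?_
  rintro a b hab p hp p' hp'
  simp only [Option.map_eq_some_iff] at hp hp'
  obtain ⟨v, -, rfl⟩ := hp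
  obtain ⟨v', -, rfl⟩ := hp'
  exact hab

lemma pv_mem_T (d : PySem.Dict String String) (hnd : d.keys.Nodup) (n : Int) (v : String) :
    (n, v) ∈ pvT d ↔ n ∈ pvL ∧ ("Header " ++ PySem.Int.toStr n, v) ∈ d.items := by
  simp only [pvT, List.mem_filterMap, Option.map_eq_some_iff]
  constructor
  · rintro ⟨m, hm, w, hw, h⟩
    obtain ⟨rfl, rfl⟩ := Prod.mk.injEq .. ▸ (by exact Prod.mk.inj h : m = n ∧ w = v)
    exact ⟨hm, PySem.Dict.mem_items_of_get?_eq_some d hw⟩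
  · rintro ⟨hn, hmem⟩
    exact ⟨n, hn, v, PySem.Dict.get?_of_mem_items d hmem hnd, rfl⟩

lemma pvB_sorted (d : PySem.Dict String String) (hnd : d.keys.Nodup) :
    PySem.List.sorted
      ((d.items.filter (fun p => header_levels_py.contains p.1)).map
        (fun p => (header_levels_py.getD p.1 0, p.2)))
      (fun t => t.1) false = pvT d := by
  have hkeys : (d.items.map Prod.fst).Nodup := hnd
  have hfil : ((d.items.filter (fun p => header_levels_py.contains p.1)).map Prod.fst).Nodup :=
    hkeys.sublist (List.filter_sublist.map Prod.fst)
  have hinj := List.inj_on_of_nodup_map hfil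
  have hfound : ((d.items.filter (fun p => header_levels_py.contains p.1)).map
      (fun p => (header_levels_py.getD p.1 0, p.2))).Nodup := by
    refine (hfil.of_map Prod.fst).map_on ?_
    intro x hx y hy hxy
    have hcx := (List.mem_filter.mp hx).2
    have hcy := (List.mem_filter.mp hy).2
    have h1 : x.1 = y.1 := by
      rw [(pv_hl_spec x.1 hcx).1, (pv_hl_spec y.1 hcy).1,
        (Prod.mk.inj hxy).1]
    exact hinj hx hy h1
  have hT : (pvT d).Nodup :=
    (pvT_pairwise d).imp (fun h he => absurd (he ▸ h) (lt_irrefl _))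
  refine PySem.List.sorted_eq_of_perm_of_pairwise_lt _ (pvT d) _ ?_ (pvT_pairwise d)
  rw [List.perm_ext_iff_of_nodup hT hfound]
  rintro ⟨n, v⟩
  rw [pv_mem_T d hnd]
  simp only [List.mem_map, List.mem_filter]
  constructor
  · rintro ⟨hn, hmem⟩
    have hc : header_levels_py.contains ("Header " ++ PySem.Int.toStr n) = true :=
      (pv_hl_contains _).mpr ⟨n, hn, rfl⟩
    exact ⟨("Header " ++ PySem.Int.toStr n, v), ⟨hmem, hc⟩, by rw [pv_hl_lvl n hn]⟩
  · rintro ⟨p, ⟨hp, hc⟩, hpe⟩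
    obtain ⟨hl, hlv⟩ := pv_hl_spec p.1 hc
    obtain ⟨h1, h2⟩ := Prod.mk.inj hpe
    subst h1 h2
    exact ⟨hlv, by rw [← hl]; exact hp⟩

-- ===== VERDICT (by name: the statement is the Claim_ definition above) =====
theorem build_header_context_py_spec : Claim_equal_build_header_context_py := by
  intro metadata _
  simp only [Spec_build_header_context_py, build_header_context_py, build_header_context_py_alt]
  have hnd : (PySem.Dict.ofList metadata : PySem.Dict String String).keys.Nodup :=
    PySem.Dict.nodup_keys_ofList metadata
  rw [show PySem.List.pyRange 1 7 1 = pvL from by decide, pvA_foldl, pvB_sorted _ hnd]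
  simp only [List.nil_append, pvT]
  rfl
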